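-- pv_equiv track=rewrite | github.com/sboluda/Algorithms_Biology | P1/compare_sequences/ini_move_gaps.py | move_gaps
-- ===== SOURCE A (Python) =====
-- def move_gaps(seq1, seq2):
--     """
--     Generate alignments by moving gaps in one sequence
--     in another sequence.
--     >>> move_gaps("THEFASTCAT", "THEFATCAT")
--     ['THEFASTCAT', '-THEFATCAT', 'T-HEFATCAT', 'TH-EFATCAT', 'THE-FATCAT', 'THEF-ATCAT', 'THEFA-TCAT', 'THEFAT-CAT', 'THEFATC-AT', 'THEFATCA-T', 'THEFATCAT-']
--     >>> move_gaps("THEFASTCAT", "AFASTCAT")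
--     ['THEFASTCAT', '--AFASTCAT', 'A--FASTCAT', 'AF--ASTCAT', 'AFA--STCAT', 'AFAS--TCAT', 'AFAST--CAT', 'AFASTC--AT', 'AFASTCA--T', 'AFASTCAT--']
--     >>> move_gaps("THEFATCAT", "THEFASTCAT")
--     ['THEFASTCAT', '-THEFATCAT', 'T-HEFATCAT', 'TH-EFATCAT', 'THE-FATCAT', 'THEF-ATCAT', 'THEFA-TCAT', 'THEFAT-CAT', 'THEFATC-AT', 'THEFATCA-T', 'THEFATCAT-']
--     >>> move_gaps("AFASTCAT", "THEFASTCAT")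
--     ['THEFASTCAT', '--AFASTCAT', 'A--FASTCAT', 'AF--ASTCAT', 'AFA--STCAT', 'AFAS--TCAT', 'AFAST--CAT', 'AFASTC--AT', 'AFASTCA--T', 'AFASTCAT--']
--     """
--     assert len(seq1) != len(seq2)
--     if len(seq1) > len(seq2):
--         largest_alignment, moving_seq = seq1, seq2
--     else:
--         largest_alignment, moving_seq = seq2, seq1
--
--     num_alignments = len(moving_seq)
--     window = len(largest_alignment) - len(moving_seq)
--
--     movements = [largest_alignment] + [moving_seq[:i] + "-"*window + moving_seq[i:]
--                                        for i in range(num_alignments + 1)]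
--     # range is num_alignments + 1 because we just want to fill the gaps in between with "-"
--
--     return movements
-- ===== SOURCE B (Python) =====
-- def move_gaps(seq1, seq2):
--     """Generate alignments by sliding a gap block through the shorter sequence."""
--     assert len(seq1) != len(seq2)
--     if len(seq1) > len(seq2):
--         largest_alignment, moving_seq = seq1, seq2
--     else:
--         largest_alignment, moving_seq = seq2, seq1
--     window = len(largest_alignment) - len(moving_seq)
--     cur = ['-'] * window + list(moving_seq)
--     movements = [largest_alignment, ''.join(cur)]
--     for i in range(1, len(moving_seq) + 1):
--         c = cur.pop(window + i - 1)
--         cur.insert(i - 1, c)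
--         movements.append(''.join(cur))
--     return movements
-- ===== Notes on version B (the rewrite author's own statement) =====
-- stated objective: alternative
-- what changed: B maintains one running character list and slides the gap block one position per step (pop the char after the gaps, re-insert it before them), instead of re-slicing moving_seq afresh for every position as A does.
import Mathlib
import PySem

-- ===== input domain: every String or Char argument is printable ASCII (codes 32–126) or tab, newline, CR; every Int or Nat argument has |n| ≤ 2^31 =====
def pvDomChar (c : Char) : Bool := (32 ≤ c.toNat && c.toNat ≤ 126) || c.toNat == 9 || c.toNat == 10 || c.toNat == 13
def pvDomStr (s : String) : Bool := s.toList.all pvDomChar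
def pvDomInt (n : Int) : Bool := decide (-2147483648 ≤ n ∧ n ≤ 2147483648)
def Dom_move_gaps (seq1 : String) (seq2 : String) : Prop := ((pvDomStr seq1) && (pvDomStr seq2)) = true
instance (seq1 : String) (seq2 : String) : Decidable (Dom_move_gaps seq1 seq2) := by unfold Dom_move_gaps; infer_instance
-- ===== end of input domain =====

-- B slides one running gap block through a single maintained character list instead of
-- re-slicing the moving sequence for every position (alternative decomposition, same cost).

-- ===== PORT A =====
def move_gaps (seq1 : String) (seq2 : String) : List String :=
  let s1 := seq1.toList
  let s2 := seq2.toList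
  -- assert len(seq1) != len(seq2): raises AssertionError on equal lengths, excluded by Pre_
  let p := if s1.length > s2.length then (s1, s2) else (s2, s1)
  let largest := p.1
  let moving := p.2
  let num_alignments := moving.length
  let window := largest.length - moving.length
  [String.ofList largest] ++
    (PySem.List.pyRange 0 ((num_alignments : Int) + 1) 1).map (fun i =>
      String.ofList (PySem.List.slice moving none (some i) ++
        List.replicate window '-' ++ PySem.List.slice moving (some i) none))

-- ===== PORT B =====
def move_gaps_alt (seq1 : String) (seq2 : String) : List String :=
  let s1 := seq1.toList
  let s2 := seq2.toList
  -- assert len(seq1) != len(seq2): raises AssertionError on equal lengths, excluded by Pre_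
  let p := if s1.length > s2.length then (s1, s2) else (s2, s1)
  let largest := p.1
  let moving := p.2
  let window := largest.length - moving.length
  let cur0 := List.replicate window '-' ++ moving
  ((PySem.List.pyRange 1 ((moving.length : Int) + 1) 1).foldl
      (fun (acc : List String × List Char) i =>
        match PySem.List.pop? acc.2 ((window : Int) + i - 1) with
        | some (c, rest) =>
            let cur' := PySem.List.insert rest (i - 1) c
            (acc.1 ++ [String.ofList cur'], cur')
        | none => acc)
      ([String.ofList largest, String.ofList cur0], cur0)).1

-- ===== PRECONDITION & SPEC =====
-- Pre_ excludes exactly the inputs of equal length, where A's assert raises AssertionError.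
def Pre_move_gaps (seq1 : String) (seq2 : String) : Prop :=
  seq1.toList.length ≠ seq2.toList.length
instance (seq1 : String) (seq2 : String) : Decidable (Pre_move_gaps seq1 seq2) := by
  unfold Pre_move_gaps; infer_instance
def pvWitness_move_gaps : String × String := ("AB", "A")

def Spec_move_gaps (seq1 : String) (seq2 : String) (out : List String) : Prop := out = move_gaps_alt seq1 seq2
instance (seq1 : String) (seq2 : String) (out : List String) : Decidable (Spec_move_gaps seq1 seq2 out) := by unfold Spec_move_gaps; infer_instance

-- ===== CLAIM (what is proved, stated in full; the proofs are below) =====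
def Claim_equal_move_gaps : Prop := ∀ (seq1 : String) (seq2 : String), Dom_move_gaps seq1 seq2 → Pre_move_gaps seq1 seq2 → Spec_move_gaps seq1 seq2 (move_gaps seq1 seq2)

-- ===== LEMMAS AND PROOFS =====

def mgState (m g : List Char) (j : Nat) : List Char := m.take j ++ (g ++ m.drop j)

lemma mg_pop_step (m g : List Char) (j : Nat) (hj : j < m.length) :
    PySem.List.pop? (mgState m g j) (((g.length + j : Nat) : Int)) =
      some (m[j], m.take j ++ (g ++ m.drop (j + 1))) := by
  have hlen : g.length + j < (mgState m g j).length := by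
    simp [mgState]; omega
  rw [PySem.List.pop?_natCast _ _ hlen]
  have htj : (m.take j).length = j := by simp; omega
  congr 1
  refine Prod.ext ?_ ?_
  · show (mgState m g j)[g.length + j] = m[j]
    rw [show (mgState m g j)[g.length + j] = (mgState m g j)[g.length + j]'hlen from rfl]
    simp only [mgState]
    rw [List.getElem_append_right (by omega)]
    rw [List.getElem_append_right (by simp; omega)]
    simp [htj, List.getElem_drop]
  · show (mgState m g j).eraseIdx (g.length + j) = _
    simp only [mgState]
    rw [List.eraseIdx_append_of_length_le (by omega)]
    rw [List.eraseIdx_append_of_length_le (by simp; omega)]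
    congr 1
    congr 1
    have : g.length + j - (List.take j m).length - g.length = 0 := by omega
    rw [this, List.eraseIdx_zero, List.tail_drop]

lemma mg_insert_step (m g : List Char) (j : Nat) (hj : j < m.length) :
    PySem.List.insert (m.take j ++ (g ++ m.drop (j + 1))) ((j : Nat) : Int) m[j] =
      mgState m g (j + 1) := by
  rw [PySem.List.insert_natCast _ _ _ (by simp; omega)]
  have htj : (m.take j).length = j := by simp; omega
  rw [List.take_append_of_le_length (by omega), List.drop_append_of_le_length (by omega)]
  have hts : List.take (j + 1) m = List.take j m ++ [m[j]] := by
    rw [List.take_add_one, List.getElem?_eq_getElem hj]; simp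
  rw [List.take_take, min_self, List.drop_eq_nil_of_le (le_of_eq htj), List.nil_append]
  simp only [mgState]
  rw [hts, List.append_assoc, List.singleton_append]

lemma mg_loop (m g : List Char) (w : Nat) (hw : g.length = w) (pre : List String) (n : Nat) (hn : n ≤ m.length) :
    ((List.range n).foldl
        (fun (acc : List String × List Char) (k : Nat) =>
          match PySem.List.pop? acc.2 ((w : Int) + (1 + (k : Int)) - 1) with
          | some (c, rest) =>
              let cur' := PySem.List.insert rest ((1 + (k : Int)) - 1) c
              (acc.1 ++ [String.ofList cur'], cur')
          | none => acc)
        (pre, mgState m g 0)) =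
      (pre ++ (List.range n).map (fun t => String.ofList (mgState m g (t + 1))), mgState m g n) := by
  induction n with
  | zero => simp
  | succ n ih =>
    have hn' : n ≤ m.length := by omega
    have hj : n < m.length := by omega
    rw [List.range_succ, List.foldl_append, ih hn']
    simp only [List.foldl_cons, List.foldl_nil]
    have e1 : (w : Int) + (1 + (n : Int)) - 1 = ((g.length + n : Nat) : Int) := by
      subst hw; omega
    have e2 : (1 + (n : Int)) - 1 = ((n : Nat) : Int) := by omega
    rw [e1, mg_pop_step m g n hj]
    simp only [e2, mg_insert_step m g n hj]
    rw [List.map_append, List.map_cons, List.map_nil, List.append_assoc]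


lemma mg_main (L m : List Char) (w : Nat) :
    [String.ofList L] ++
      (PySem.List.pyRange 0 ((m.length : Int) + 1) 1).map (fun i =>
        String.ofList (PySem.List.slice m none (some i) ++
          List.replicate w '-' ++ PySem.List.slice m (some i) none)) =
    ((PySem.List.pyRange 1 ((m.length : Int) + 1) 1).foldl
        (fun (acc : List String × List Char) i =>
          match PySem.List.pop? acc.2 ((w : Int) + i - 1) with
          | some (c, rest) =>
              let cur' := PySem.List.insert rest (i - 1) c
              (acc.1 ++ [String.ofList cur'], cur')
          | none => acc)
        ([String.ofList L, String.ofList (List.replicate w '-' ++ m)],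
          List.replicate w '-' ++ m)).1 := by
  have hg : (List.replicate w '-').length = w := by simp
  have hcur0 : List.replicate w '-' ++ m = mgState m (List.replicate w '-') 0 := by
    simp [mgState]
  -- B side
  rw [PySem.List.pyRange_one 1 ((m.length : Int) + 1)]
  have hn1 : (((m.length : Int) + 1) - 1).toNat = m.length := by omega
  rw [hn1, List.foldl_map, hcur0,
      mg_loop m (List.replicate w '-') w hg _ m.length le_rfl]
  -- A side
  rw [PySem.List.pyRange_one 0 ((m.length : Int) + 1)]
  have hn2 : (((m.length : Int) + 1) - 0).toNat = m.length + 1 := by omega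
  rw [hn2, List.map_map]
  have hmap : ∀ k ∈ List.range (m.length + 1),
      ((fun i => String.ofList (PySem.List.slice m none (some i) ++
          List.replicate w '-' ++ PySem.List.slice m (some i) none)) ∘ (fun k : Nat => (0 : Int) + ↑k)) k
        = String.ofList (mgState m (List.replicate w '-') k) := by
    intro k hk
    simp only [Function.comp, zero_add]
    rw [PySem.List.slice_to_natCast, PySem.List.slice_from_natCast]
    simp [mgState]
  rw [List.map_congr_left hmap]
  rw [List.range_succ_eq_map, List.map_cons, List.map_map]
  simp only [mgState, List.take_zero, List.drop_zero, List.nil_append, List.singleton_append]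
  rfl


-- ===== VERDICT (by name: the statement is the Claim_ definition above) =====
theorem move_gaps_spec : Claim_equal_move_gaps := by
  intro seq1 seq2 _ hpre
  unfold Spec_move_gaps move_gaps move_gaps_alt
  by_cases h : seq1.toList.length > seq2.toList.length
  · simp only [if_pos h]
    exact mg_main _ _ _
  · simp only [if_neg h]
    exact mg_main _ _ _
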